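-- pv_equiv track=rewrite | github.com/ecoffie/Bootcamp | auto-generate-hit-lists.py | filter_general_contractors
-- ===== SOURCE A (Python) =====
-- def filter_general_contractors(opportunities):
--     """Filter for construction/GC opportunities"""
--     gc_keywords = ['construction', 'build', 'renovation', 'facility', 'infrastructure',
--                    'maintenance', 'repair', 'construction services', 'general contractor',
--                    'architect', 'engineering', 'design-build']
--
--     gc_opportunities = []
--
--     for opp in opportunities:
--         description = str(opp.get('Description', '')).lower()
--         title = str(opp.get('Title', '')).lower()
--         naics = str(opp.get('NAICS Code', '')).lower()
--
--         # Check if construction-related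
--         is_gc = False
--         for keyword in gc_keywords:
--             if keyword in description or keyword in title:
--                 is_gc = True
--                 break
--
--         # Check NAICS codes (construction-related)
--         construction_naics = ['236', '237', '238', '5413']  # Construction NAICS prefixes
--         if any(naics.startswith(code) for code in construction_naics):
--             is_gc = True
--
--         if is_gc:
--             gc_opportunities.append(opp)
--
--     # Sort by response date
--     gc_opportunities.sort(key=lambda x: x.get('Current Response Date', '9999-99-99'))
--
--     return gc_opportunities[:25]  # Top 25
-- ===== SOURCE B (Python) =====
-- def filter_general_contractors(opportunities):
--     """Filter for construction/GC opportunities (single pass with a bounded top-25 buffer)"""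
--     gc_keywords = ['construction', 'build', 'renovation', 'facility', 'infrastructure',
--                    'maintenance', 'repair', 'construction services', 'general contractor',
--                    'architect', 'engineering', 'design-build']
--     naics_prefixes = ('236', '237', '238', '5413')
--
--     best = []   # at most 25 entries ((date, seq), opp), kept sorted by (date, seq)
--     seq = 0
--     for opp in opportunities:
--         description = str(opp.get('Description', '')).lower()
--         title = str(opp.get('Title', '')).lower()
--         naics = str(opp.get('NAICS Code', '')).lower()
--         if (any(k in description or k in title for k in gc_keywords)
--                 or naics.startswith(naics_prefixes)):
--             key = (opp.get('Current Response Date', '9999-99-99'), seq)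
--             seq += 1
--             i = 0
--             while i < len(best) and best[i][0] < key:
--                 i += 1
--             best.insert(i, (key, opp))
--             if len(best) > 25:
--                 best.pop()
--     return [opp for _, opp in best]
-- ===== Notes on version B (the rewrite author's own statement) =====
-- stated objective: alternative
-- what changed: Instead of collecting all matches, stable-sorting the whole filtered list by response date and slicing off 25, B makes a single pass that maintains a bounded sorted buffer of at most 25 (date, arrival-index) keyed entries, inserting each accepted opportunity in place and dropping the last entry when the buffer exceeds 25; total cost is dominated by the keyword scan in both, so runtime is similar.
import Mathlib
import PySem

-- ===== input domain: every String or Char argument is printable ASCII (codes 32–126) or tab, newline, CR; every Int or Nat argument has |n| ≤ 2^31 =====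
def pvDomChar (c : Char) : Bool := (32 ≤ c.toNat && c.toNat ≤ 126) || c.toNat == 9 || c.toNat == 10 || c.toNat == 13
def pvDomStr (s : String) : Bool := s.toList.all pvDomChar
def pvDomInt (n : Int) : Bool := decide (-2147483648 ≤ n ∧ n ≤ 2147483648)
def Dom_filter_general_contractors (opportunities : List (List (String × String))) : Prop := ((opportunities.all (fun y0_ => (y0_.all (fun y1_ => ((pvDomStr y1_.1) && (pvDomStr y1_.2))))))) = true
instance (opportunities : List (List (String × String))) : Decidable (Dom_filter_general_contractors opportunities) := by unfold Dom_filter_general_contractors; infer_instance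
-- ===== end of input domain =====

-- B replaces A's full stable sort + [:25] of the filtered list by a single pass that keeps a
-- bounded (≤ 25 entries) sorted buffer keyed by (response date, arrival index): objective 'alternative'
-- (a different top-25 selection algorithm; measured runtime is dominated by the keyword scan in both).

-- opp.get(k, dflt) on an association list (dict in insertion order; lookup = first match)
def pyDictGetD (d : List (String × String)) (k dflt : String) : String :=
  match d.find? (fun p => p.1 == k) with
  | some p => p.2
  | none => dflt

-- ===== PORT A =====
def gcKeywordsA : List String :=
  ["construction", "build", "renovation", "facility", "infrastructure",
   "maintenance", "repair", "construction services", "general contractor",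
   "architect", "engineering", "design-build"]

def constructionNaicsA : List String := ["236", "237", "238", "5413"]

def filter_general_contractors (opportunities : List (List (String × String))) : List (List (String × String)) :=
  let gc_opportunities := opportunities.foldl (fun acc opp =>
    let description := PySem.Str.lower (pyDictGetD opp "Description" "")
    let title := PySem.Str.lower (pyDictGetD opp "Title" "")
    let naics := PySem.Str.lower (pyDictGetD opp "NAICS Code" "")
    -- 'for keyword in gc_keywords: … break' = first hit decides: List.any
    let is_gc := gcKeywordsA.any (fun keyword =>
      PySem.Str.isIn keyword description || PySem.Str.isIn keyword title)
    let is_gc := if constructionNaicsA.any (fun code => PySem.Str.startswith naics code) then true else is_gc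
    if is_gc then acc ++ [opp] else acc) []
  -- gc_opportunities.sort(key=…); return gc_opportunities[:25]
  PySem.List.slice (PySem.List.sorted gc_opportunities
    (fun x => pyDictGetD x "Current Response Date" "9999-99-99")) none (some 25)

-- ===== PORT B =====
def gcKeywordsB : List String :=
  ["construction", "build", "renovation", "facility", "infrastructure",
   "maintenance", "repair", "construction services", "general contractor",
   "architect", "engineering", "design-build"]

def naicsPrefixesB : List String := ["236", "237", "238", "5413"]

-- Python tuple comparison (date, seq) < (date, seq)
def bKeyLt (a b : String × Nat) : Bool := a.1 < b.1 || (a.1 == b.1 && a.2 < b.2)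

-- the 'while i < len(best) and best[i][0] < key: i += 1; best.insert(i, (key, opp))' scan
def bInsert (x : (String × Nat) × List (String × String)) :
    List ((String × Nat) × List (String × String)) → List ((String × Nat) × List (String × String))
  | [] => [x]
  | y :: t => if bKeyLt y.1 x.1 then y :: bInsert x t else x :: y :: t

def filter_general_contractors_alt (opportunities : List (List (String × String))) : List (List (String × String)) :=
  let st := opportunities.foldl (fun st opp =>
    let description := PySem.Str.lower (pyDictGetD opp "Description" "")
    let title := PySem.Str.lower (pyDictGetD opp "Title" "")
    let naics := PySem.Str.lower (pyDictGetD opp "NAICS Code" "")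
    if gcKeywordsB.any (fun k => PySem.Str.isIn k description || PySem.Str.isIn k title)
        || naicsPrefixesB.any (fun p => PySem.Str.startswith naics p) then
      let key := (pyDictGetD opp "Current Response Date" "9999-99-99", st.2)
      let best := bInsert (key, opp) st.1
      let best := if best.length > 25 then best.dropLast else best  -- best.pop()
      (best, st.2 + 1)
    else st) ([], 0)
  st.1.map (fun e => e.2)

-- ===== PRECONDITION & SPEC =====
def Spec_filter_general_contractors (opportunities : List (List (String × String))) (out : List (List (String × String))) : Prop := out = filter_general_contractors_alt opportunities
instance (opportunities : List (List (String × String))) (out : List (List (String × String))) : Decidable (Spec_filter_general_contractors opportunities out) := by unfold Spec_filter_general_contractors; infer_instance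

-- ===== CLAIM (what is proved, stated in full; the proofs are below) =====
def Claim_equal_filter_general_contractors : Prop := ∀ (opportunities : List (List (String × String))), Dom_filter_general_contractors opportunities → Spec_filter_general_contractors opportunities (filter_general_contractors opportunities)

-- ===== LEMMAS AND PROOFS =====

-- abbreviations used only by the proofs
def respKey (x : List (String × String)) : String := pyDictGetD x "Current Response Date" "9999-99-99"

def predGc (opp : List (String × String)) : Bool :=
  let description := PySem.Str.lower (pyDictGetD opp "Description" "")
  let title := PySem.Str.lower (pyDictGetD opp "Title" "")
  let naics := PySem.Str.lower (pyDictGetD opp "NAICS Code" "")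
  gcKeywordsB.any (fun k => PySem.Str.isIn k description || PySem.Str.isIn k title)
    || naicsPrefixesB.any (fun p => PySem.Str.startswith naics p)

-- B's loop body on an accepted element
def gStep (st : List ((String × Nat) × List (String × String)) × Nat) (opp : List (String × String)) :
    List ((String × Nat) × List (String × String)) × Nat :=
  let best := bInsert ((respKey opp, st.2), opp) st.1
  ((if best.length > 25 then best.dropLast else best), st.2 + 1)

-- the unbounded variant of B's loop body (no 25-cap)
def uStep (st : List ((String × Nat) × List (String × String)) × Nat) (opp : List (String × String)) :
    List ((String × Nat) × List (String × String)) × Nat :=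
  (bInsert ((respKey opp, st.2), opp) st.1, st.2 + 1)

theorem length_bInsert (x : (String × Nat) × List (String × String))
    (c : List ((String × Nat) × List (String × String))) : (bInsert x c).length = c.length + 1 := by
  induction c with
  | nil => rfl
  | cons y t ih => simp only [bInsert]; split <;> simp [ih]

theorem mem_bInsert (e x : (String × Nat) × List (String × String))
    (c : List ((String × Nat) × List (String × String))) : e ∈ bInsert x c ↔ e = x ∨ e ∈ c := by
  induction c with
  | nil => simp [bInsert]
  | cons y t ih =>
    simp only [bInsert]
    split
    · simp [ih]; tauto
    · simp

theorem take_bInsert_take (n : Nat) (x : (String × Nat) × List (String × String))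
    (c : List ((String × Nat) × List (String × String))) :
    (bInsert x (c.take n)).take n = (bInsert x c).take n := by
  induction c generalizing n with
  | nil => simp
  | cons y t ih =>
    cases n with
    | zero => simp
    | succ m =>
      simp only [List.take_succ_cons, bInsert]
      split
      · simp [ih]
      · cases m with
        | zero => simp
        | succ k => simp [List.take_take]

-- the capped insertion step equals take-25 of the uncapped one
theorem cap_bInsert (x : (String × Nat) × List (String × String))
    (c : List ((String × Nat) × List (String × String))) :
    (if (bInsert x (c.take 25)).length > 25 then (bInsert x (c.take 25)).dropLast
     else bInsert x (c.take 25)) = (bInsert x c).take 25 := by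
  by_cases h25 : 25 ≤ c.length
  · have hlen : (bInsert x (c.take 25)).length = 26 := by
      rw [length_bInsert]; simp [List.length_take, Nat.min_eq_left h25]
    rw [if_pos (by omega), List.dropLast_eq_take, hlen]
    simpa using take_bInsert_take 25 x c
  · have hc : c.take 25 = c := List.take_of_length_le (by omega)
    have hlen : (bInsert x c).length ≤ 25 := by rw [length_bInsert]; omega
    rw [hc, if_neg (by omega), List.take_of_length_le hlen]

-- the bounded loop computes take-25 of the unbounded loop
theorem loopB_eq_loopU (l : List (List (String × String)))
    (c : List ((String × Nat) × List (String × String))) (s : Nat) :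
    l.foldl gStep (c.take 25, s) = ((l.foldl uStep (c, s)).1.take 25, (l.foldl uStep (c, s)).2) := by
  induction l generalizing c s with
  | nil => simp
  | cons x t ih =>
    simp only [List.foldl_cons]
    have h : gStep (c.take 25, s) x = ((bInsert ((respKey x, s), x) c).take 25, s + 1) := by
      simp only [gStep, cap_bInsert]
    rw [h]
    exact ih _ _

def goodBuf (c : List ((String × Nat) × List (String × String))) (s : Nat) : Prop :=
  ∀ e ∈ c, e.1.1 = respKey e.2 ∧ e.1.2 < s

-- projecting the keyed insertion gives the stable insertion used by sorted
theorem bInsert_proj (x : List (String × String)) (s : Nat)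
    (c : List ((String × Nat) × List (String × String))) (h : goodBuf c s) :
    (bInsert ((respKey x, s), x) c).map (fun e => e.2)
      = PySem.List.insertBy (fun a b => decide (respKey a < respKey b)) x (c.map (fun e => e.2)) := by
  induction c with
  | nil => rfl
  | cons y t ih =>
    obtain ⟨hk, hi⟩ := h y (by simp)
    have ht : goodBuf t s := fun e he => h e (by simp [he])
    simp only [bInsert, List.map_cons, PySem.List.insertBy]
    have hcond : bKeyLt y.1 (respKey x, s) = !decide (respKey x < respKey y.2) := by
      simp only [bKeyLt, hk]
      rcases lt_trichotomy (respKey y.2) (respKey x) with hlt | heq | hgt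
      · simp [hlt, not_lt_of_gt hlt]
      · simp [heq, hi]
      · simp [not_lt_of_gt hgt, ne_of_gt hgt, hgt]
    rw [hcond]
    by_cases hx : respKey x < respKey y.2
    · simp [hx]
    · simp [hx, ih ht]

theorem goodBuf_bInsert (x : List (String × String)) (s : Nat)
    (c : List ((String × Nat) × List (String × String))) (h : goodBuf c s) :
    goodBuf (bInsert ((respKey x, s), x) c) (s + 1) := by
  intro e he
  rcases (mem_bInsert e _ c).1 he with rfl | he'
  · exact ⟨rfl, Nat.lt_succ_self s⟩
  · obtain ⟨h1, h2⟩ := h e he'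
    exact ⟨h1, Nat.lt_succ_of_lt h2⟩

-- the unbounded loop, projected, is A's insertion-sort fold
theorem loopU_proj (l : List (List (String × String)))
    (c : List ((String × Nat) × List (String × String))) (s : Nat) (h : goodBuf c s) :
    (l.foldl uStep (c, s)).1.map (fun e => e.2)
      = l.foldl (fun acc x => PySem.List.insertBy (fun a b => decide (respKey a < respKey b)) x acc)
          (c.map (fun e => e.2)) := by
  induction l generalizing c s with
  | nil => rfl
  | cons x t ih =>
    simp only [List.foldl_cons, uStep]
    rw [ih _ _ (goodBuf_bInsert x s c h), bInsert_proj x s c h]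

-- predicate of A's loop = predicate of B's loop
theorem predA_eq (opp : List (String × String)) :
    (if constructionNaicsA.any (fun code =>
          PySem.Str.startswith (PySem.Str.lower (pyDictGetD opp "NAICS Code" "")) code) then true
     else gcKeywordsA.any (fun keyword =>
        PySem.Str.isIn keyword (PySem.Str.lower (pyDictGetD opp "Description" ""))
          || PySem.Str.isIn keyword (PySem.Str.lower (pyDictGetD opp "Title" "")))) = predGc opp := by
  simp only [predGc, gcKeywordsA, gcKeywordsB, constructionNaicsA, naicsPrefixesB]
  split <;> simp_all

theorem respKey_eq : (fun x : List (String × String) => pyDictGetD x "Current Response Date" "9999-99-99") = respKey := rfl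

-- A = stable sort of the filtered list, then take 25
theorem A_char (opps : List (List (String × String))) :
    filter_general_contractors opps
      = (PySem.List.sorted (opps.filter predGc) respKey).take 25 := by
  unfold filter_general_contractors
  rw [PySem.List.slice_to _ (by norm_num)]
  simp only [PySem.List.foldl_append_if_eq_filter, List.nil_append, respKey_eq]
  rw [List.filter_congr (fun x _ => predA_eq x)]
  rfl

-- B = take 25 of the unbounded keyed insertion fold over the filtered list, projected
theorem B_char (opps : List (List (String × String))) :
    filter_general_contractors_alt opps
      = ((((opps.filter predGc).foldl uStep ([], 0)).1.take 25).map (fun e => e.2)) := by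
  unfold filter_general_contractors_alt
  show (List.foldl (fun st opp => if predGc opp then gStep st opp else st) ([], 0) opps).1.map
        (fun e => e.2) = _
  rw [PySem.List.foldl_if_eq_foldl_filter]
  have h := loopB_eq_loopU (opps.filter predGc) [] 0
  simp only [List.take_nil] at h
  rw [h]

-- ===== VERDICT (by name: the statement is the Claim_ definition above) =====
theorem filter_general_contractors_spec : Claim_equal_filter_general_contractors := by
  intro opportunities _
  unfold Spec_filter_general_contractors
  rw [A_char, B_char, PySem.List.sorted_eq_foldl_insertBy]
  have h := loopU_proj (opportunities.filter predGc) [] 0 (by intro e he; simp at he)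
  simp only [List.map_nil] at h
  rw [← h, List.map_take]
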